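-- pv_equiv track=rewrite | github.com/QuantumWarpCode/AdventOfCode2025 | Day9-2.py | searchColumn
-- ===== SOURCE A (Python) =====
-- def searchColumn(grid, x, y):
--     topB = False
--     bottomB = False
--     for i in range(0, len(grid)):
--         if i < y and grid[i][x] == "#":
--             topB = True
--         elif i > y and grid[i][x] == "#":
--             bottomB = True
--     if topB and bottomB:
--         return True
--     else:
--         return False
-- ===== SOURCE B (Python) =====
-- def searchColumn(grid, x, y):
--     hits = [i for i, row in enumerate(grid) if i != y and row[x] == "#"]
--     return bool(hits) and min(hits) < y and max(hits) > y
-- ===== Notes on version B (the rewrite author's own statement) =====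
-- stated objective: alternative
-- what changed: B collects the row indices of '#' hits in the column (skipping row y) in one pass and decides from min(hits) < y and max(hits) > y, instead of A's per-row update of two boolean branch flags.
import Mathlib
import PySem

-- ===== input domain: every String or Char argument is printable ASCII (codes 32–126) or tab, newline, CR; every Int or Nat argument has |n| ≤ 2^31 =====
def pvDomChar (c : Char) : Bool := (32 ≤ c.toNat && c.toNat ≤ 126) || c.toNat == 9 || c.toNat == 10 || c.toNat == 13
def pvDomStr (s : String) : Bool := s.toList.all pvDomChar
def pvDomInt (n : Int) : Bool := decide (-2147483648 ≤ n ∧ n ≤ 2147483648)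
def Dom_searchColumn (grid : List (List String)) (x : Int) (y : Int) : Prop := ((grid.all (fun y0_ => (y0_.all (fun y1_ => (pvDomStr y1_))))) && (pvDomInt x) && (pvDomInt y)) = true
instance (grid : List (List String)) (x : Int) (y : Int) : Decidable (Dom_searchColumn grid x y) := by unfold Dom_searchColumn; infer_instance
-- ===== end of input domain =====

-- B collects the hit row indices in one pass and decides from min/max, instead of A's two boolean flags: a different decomposition, same cost.

-- ===== PORT A =====
-- flag loop over range(0, len(grid)); grid[i][x] is exact on Pre_ (x a valid Python index for every scanned row)
def searchColumn (grid : List (List String)) (x : Int) (y : Int) : Bool :=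
  let st := (PySem.List.pyRange 0 (grid.length : Int) 1).foldl
    (fun (st : Bool × Bool) i =>
      if i < y ∧ PySem.List.pyGetD (PySem.List.pyGetD grid i []) x "" = "#" then (true, st.2)
      else if i > y ∧ PySem.List.pyGetD (PySem.List.pyGetD grid i []) x "" = "#" then (st.1, true)
      else st)
    (false, false)
  if st.1 && st.2 then true else false

-- ===== PORT B =====
-- hits = [i for i, row in enumerate(grid) if i != y and row[x] == "#"]; bool(hits) and min(hits) < y and max(hits) > y
def searchColumn_alt (grid : List (List String)) (x : Int) (y : Int) : Bool :=
  let hits := (PySem.List.enumerate grid).filterMap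
    (fun p => if p.1 ≠ y ∧ PySem.List.pyGetD p.2 x "" = "#" then some p.1 else none)
  match PySem.List.min? hits (fun i => i), PySem.List.max? hits (fun i => i) with
  | some m, some M => decide (m < y) && decide (M > y)
  | _, _ => false

-- ===== PRECONDITION & SPEC =====
-- Pre_ excludes exactly the inputs where Python A raises IndexError: some scanned row i ≠ y has x out of Python index range.
def Pre_searchColumn (grid : List (List String)) (x : Int) (y : Int) : Prop :=
  ∀ p ∈ PySem.List.enumerate grid, p.1 ≠ y → PySem.Raise.InRange p.2.length x
instance (grid : List (List String)) (x : Int) (y : Int) : Decidable (Pre_searchColumn grid x y) := by unfold Pre_searchColumn; infer_instance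
def pvWitness_searchColumn : List (List String) × Int × Int := ([["#"], ["."], ["#"]], 0, 1)

def Spec_searchColumn (grid : List (List String)) (x : Int) (y : Int) (out : Bool) : Prop := out = searchColumn_alt grid x y
instance (grid : List (List String)) (x : Int) (y : Int) (out : Bool) : Decidable (Spec_searchColumn grid x y out) := by unfold Spec_searchColumn; infer_instance

-- ===== CLAIM (what is proved, stated in full; the proofs are below) =====
def Claim_equal_searchColumn : Prop := ∀ (grid : List (List String)) (x : Int) (y : Int), Dom_searchColumn grid x y → Pre_searchColumn grid x y → Spec_searchColumn grid x y (searchColumn grid x y)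

-- ===== LEMMAS AND PROOFS =====

-- A's flag fold computes "some scanned hit above y" / "some scanned hit below y".
theorem flag_fold (y : Int) (c : Int → Prop) [DecidablePred c] :
    ∀ (l : List Int) (b : Bool × Bool),
      l.foldl (fun (st : Bool × Bool) i =>
          if i < y ∧ c i then (true, st.2)
          else if i > y ∧ c i then (st.1, true)
          else st) b
      = (b.1 || l.any (fun i => decide (i < y ∧ c i)),
         b.2 || l.any (fun i => decide (i > y ∧ c i))) := by
  intro l
  induction l with
  | nil => intro b; simp
  | cons i t ih =>
    intro b
    simp only [List.foldl_cons, List.any_cons]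
    by_cases h1 : i < y ∧ c i
    · simp [ih, h1.1, h1.2, show ¬ y < i by omega]
    · by_cases h2 : i > y ∧ c i
      · simp [ih, h2.1, h2.2, show ¬ i < y by omega]
      · simp [ih, h1, h2]

theorem minmax_flags (y : Int) (c : Int → Prop) [DecidablePred c] (l : List Int) :
    (if ((l.any fun i => decide (i < y ∧ c i)) && (l.any fun i => decide (i > y ∧ c i))) = true
     then true else false)
    = (match PySem.List.min? (l.filterMap fun j => if j ≠ y ∧ c j then some j else none) (fun i => i),
             PySem.List.max? (l.filterMap fun j => if j ≠ y ∧ c j then some j else none) (fun i => i) with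
       | some m, some M => decide (m < y) && decide (M > y)
       | _, _ => false) := by
  set hits := l.filterMap (fun j => if j ≠ y ∧ c j then some j else none) with hh
  have hhits_mem : ∀ j, j ∈ hits ↔ j ∈ l ∧ j ≠ y ∧ c j := by
    intro j
    rw [hh, List.mem_filterMap]
    constructor
    · rintro ⟨a, ha, hif⟩
      by_cases h : a ≠ y ∧ c a
      · simp [h] at hif; subst hif; exact ⟨ha, h⟩
      · simp [h] at hif
    · rintro ⟨hj, h⟩; exact ⟨j, hj, by simp [h]⟩
  have hany_lt : (l.any (fun i => decide (i < y ∧ c i))) = true ↔ ∃ j ∈ hits, j < y := by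
    simp only [List.any_eq_true, decide_eq_true_eq]
    constructor
    · rintro ⟨i, hi, hlt, hci⟩
      exact ⟨i, (hhits_mem i).2 ⟨hi, by omega, hci⟩, hlt⟩
    · rintro ⟨j, hj, hlt⟩
      obtain ⟨hjl, -, hcj⟩ := (hhits_mem j).1 hj
      exact ⟨j, hjl, hlt, hcj⟩
  have hany_gt : (l.any (fun i => decide (i > y ∧ c i))) = true ↔ ∃ j ∈ hits, y < j := by
    simp only [List.any_eq_true, decide_eq_true_eq]
    constructor
    · rintro ⟨i, hi, hgt, hci⟩
      exact ⟨i, (hhits_mem i).2 ⟨hi, by omega, hci⟩, hgt⟩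
    · rintro ⟨j, hj, hgt⟩
      obtain ⟨hjl, -, hcj⟩ := (hhits_mem j).1 hj
      exact ⟨j, hjl, hgt, hcj⟩
  rcases hmin : PySem.List.min? hits (fun i => i) with _ | m
  · have hnil : hits = [] := (PySem.List.min?_eq_none_iff _ _).1 hmin
    have hmax : PySem.List.max? hits (fun i => i) = none := (PySem.List.max?_eq_none_iff _ _).2 hnil
    rw [hmax]
    have : (l.any (fun i => decide (i < y ∧ c i))) = false := by
      rw [Bool.eq_false_iff]
      intro h
      obtain ⟨j, hj, -⟩ := hany_lt.1 h
      rw [hnil] at hj; exact absurd hj (List.not_mem_nil)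
    rw [this]; simp
  · have hne : hits ≠ [] := by
      intro h; rw [(PySem.List.min?_eq_none_iff _ _).2 h] at hmin; simp at hmin
    rcases hmax : PySem.List.max? hits (fun i => i) with _ | M
    · exact absurd ((PySem.List.max?_eq_none_iff _ _).1 hmax) hne
    have hmmem := PySem.List.min?_mem hmin
    have hMmem := PySem.List.max?_mem hmax
    have hmlow := PySem.List.min?_isMin hmin
    have hMhigh := PySem.List.max?_isMax hmax
    have e1 : (l.any (fun i => decide (i < y ∧ c i))) = decide (m < y) := by
      by_cases h : m < y
      · simp only [h, decide_true]; exact hany_lt.2 ⟨m, hmmem, h⟩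
      · simp only [h, decide_false, Bool.eq_false_iff]
        intro hA
        obtain ⟨j, hj, hlt⟩ := hany_lt.1 hA
        exact h (lt_of_le_of_lt (hmlow j hj) hlt)
    have e2 : (l.any (fun i => decide (i > y ∧ c i))) = decide (M > y) := by
      by_cases h : M > y
      · simp only [h, decide_true]; exact hany_gt.2 ⟨M, hMmem, h⟩
      · simp only [h, decide_false, Bool.eq_false_iff]
        intro hA
        obtain ⟨j, hj, hgt⟩ := hany_gt.1 hA
        exact h (lt_of_lt_of_le hgt (hMhigh j hj))
    rw [e1, e2]
    by_cases h1 : m < y <;> by_cases h2 : M > y <;> simp [h1, h2]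

theorem searchColumn_spec_aux (grid : List (List String)) (x y : Int) :
    searchColumn grid x y = searchColumn_alt grid x y := by
  unfold searchColumn searchColumn_alt
  rw [PySem.List.enumerate_eq_map_pyRange (d := [])]
  rw [flag_fold y (fun i => PySem.List.pyGetD (PySem.List.pyGetD grid i []) x "" = "#")]
  simp only [Bool.false_or, List.filterMap_map, Function.comp, PySem.List.len_eq]
  exact minmax_flags y (fun i => PySem.List.pyGetD (PySem.List.pyGetD grid i []) x "" = "#")
    (PySem.List.pyRange 0 (grid.length : Int) 1)

-- ===== VERDICT (by name: the statement is the Claim_ definition above) =====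
theorem searchColumn_spec : Claim_equal_searchColumn := by
  intro grid x y _ _
  exact searchColumn_spec_aux grid x y
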